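-- pv_equiv track=rewrite | github.com/kseungwoo/algorithm-problem-solving | Programmers/2018 KAKAO BLIND RECRUITMENT/프렌즈4블록.py | blank_fill
-- ===== SOURCE A (Python) =====
-- from collections import deque
--
-- def blank_fill(m, n, b):
--     dq = deque()
--     for c in range(n):
--         for r in range(m):
--             if b[r][c] != 0:
--                 dq.append(b[r][c])
--         for _ in range(m - len(dq)):
--             dq.appendleft(0)
--         for r in range(m):
--             b[r][c] = dq[r]
--         dq.clear()
--     return b
-- ===== SOURCE B (Python) =====
-- def blank_fill(m, n, b):
--     for c in range(n):
--         w = m - 1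
--         for r in range(m - 1, -1, -1):
--             if b[r][c] != 0:
--                 b[w][c] = b[r][c]
--                 w -= 1
--         for r in range(w, -1, -1):
--             b[r][c] = 0
--     return b
-- ===== Notes on version B (the rewrite author's own statement) =====
-- stated objective: alternative
-- what changed: Replaces the per-column deque buffer (collect nonzeros, pad zeros on the left, copy back) with an in-place bottom-up two-pointer compaction: a write index moves nonzeros down within the column, then the remaining top cells are zeroed; no auxiliary buffer is kept.
import Mathlib
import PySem

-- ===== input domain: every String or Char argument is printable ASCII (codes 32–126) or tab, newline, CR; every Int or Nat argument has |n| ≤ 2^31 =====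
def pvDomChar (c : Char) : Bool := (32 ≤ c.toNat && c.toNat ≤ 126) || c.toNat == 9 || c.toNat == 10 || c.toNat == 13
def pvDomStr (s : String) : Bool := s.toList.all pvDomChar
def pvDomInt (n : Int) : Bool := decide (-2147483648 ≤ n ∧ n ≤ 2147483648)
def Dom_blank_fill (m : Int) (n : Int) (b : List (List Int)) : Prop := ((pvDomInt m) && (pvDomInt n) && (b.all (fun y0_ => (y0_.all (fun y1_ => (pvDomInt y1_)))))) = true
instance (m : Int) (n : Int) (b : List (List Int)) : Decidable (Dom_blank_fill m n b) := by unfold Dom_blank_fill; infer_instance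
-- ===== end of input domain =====

-- B replaces A's per-column deque buffer with an in-place bottom-up two-pointer
-- compaction (objective: alternative, same asymptotic cost). Both Pythons mutate b
-- in place identically; the equivalence proved here is about the return value.

-- ===== PORT A =====
def blank_fill (m : Int) (n : Int) (b : List (List Int)) : List (List Int) :=
  (PySem.List.pyRange 0 n 1).foldl (fun b c =>
    -- for r in range(m): if b[r][c] != 0: dq.append(b[r][c])
    let dq : List Int := (PySem.List.pyRange 0 m 1).foldl (fun dq r =>
      if PySem.List.pyGetD (PySem.List.pyGetD b r []) c 0 ≠ 0 then
        dq ++ [PySem.List.pyGetD (PySem.List.pyGetD b r []) c 0]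
      else dq) []
    -- for _ in range(m - len(dq)): dq.appendleft(0)
    let dq := (PySem.List.pyRange 0 (m - (dq.length : Int)) 1).foldl
      (fun dq _ => (0 : Int) :: dq) dq
    -- for r in range(m): b[r][c] = dq[r]
    (PySem.List.pyRange 0 m 1).foldl (fun b r =>
      PySem.List.pySetD b r
        (PySem.List.pySetD (PySem.List.pyGetD b r []) c (PySem.List.pyGetD dq r 0))) b) b

-- ===== PORT B =====
def blank_fill_alt (m : Int) (n : Int) (b : List (List Int)) : List (List Int) :=
  (PySem.List.pyRange 0 n 1).foldl (fun b c =>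
    -- w = m - 1; for r in range(m-1, -1, -1): if b[r][c] != 0: b[w][c] = b[r][c]; w -= 1
    let s := (PySem.List.pyRange (m - 1) (-1) (-1)).foldl
      (fun (s : List (List Int) × Int) r =>
        if PySem.List.pyGetD (PySem.List.pyGetD s.1 r []) c 0 ≠ 0 then
          (PySem.List.pySetD s.1 s.2
            (PySem.List.pySetD (PySem.List.pyGetD s.1 s.2 []) c
              (PySem.List.pyGetD (PySem.List.pyGetD s.1 r []) c 0)), s.2 - 1)
        else s) (b, m - 1)
    -- for r in range(w, -1, -1): b[r][c] = 0
    (PySem.List.pyRange s.2 (-1) (-1)).foldl (fun b r =>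
      PySem.List.pySetD b r (PySem.List.pySetD (PySem.List.pyGetD b r []) c 0)) s.1) b

-- ===== PRECONDITION & SPEC =====
-- Pre_ excludes exactly the inputs on which Python A raises an IndexError:
-- with at least one row and one column requested, A reads/writes b[r][c] for all
-- r < m, c < n, so it needs m ≤ len(b) and every one of the first m rows of length ≥ n.
def Pre_blank_fill (m : Int) (n : Int) (b : List (List Int)) : Prop :=
  0 < m → 0 < n → (m ≤ (b.length : Int) ∧ ∀ row ∈ b.take m.toNat, n ≤ (row.length : Int))
instance (m : Int) (n : Int) (b : List (List Int)) : Decidable (Pre_blank_fill m n b) := by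
  unfold Pre_blank_fill; infer_instance

def pvWitness_blank_fill : Int × Int × List (List Int) := (2, 2, [[1, 0], [0, 2]])

def Spec_blank_fill (m : Int) (n : Int) (b : List (List Int)) (out : List (List Int)) : Prop := out = blank_fill_alt m n b
instance (m : Int) (n : Int) (b : List (List Int)) (out : List (List Int)) : Decidable (Spec_blank_fill m n b out) := by unfold Spec_blank_fill; infer_instance

-- ===== CLAIM (what is proved, stated in full; the proofs are below) =====
def Claim_equal_blank_fill : Prop := ∀ (m : Int) (n : Int) (b : List (List Int)), Dom_blank_fill m n b → Pre_blank_fill m n b → Spec_blank_fill m n b (blank_fill m n b)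

-- ===== LEMMAS AND PROOFS =====

-- cell read b[r][c] and single-cell write b[r][c] = v, for nonnegative indices
def cellM (g : List (List Int)) (r : Int) (c : Int) : Int :=
  (g.getD r.toNat []).getD c.toNat 0

def putM (g : List (List Int)) (r : Int) (c : Int) (v : Int) : List (List Int) :=
  g.set r.toNat ((g.getD r.toNat []).set c.toNat v)

-- write the value v r into cell (r, c) for each r in the row list R
def wrows (c : Int) (v : Int → Int) (g : List (List Int)) (R : List Int) : List (List Int) :=
  R.foldl (fun g r => putM g r c (v r)) g

-- the nonzero entries of column c among rows 0..j-1, top-down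
def nzcol (g : List (List Int)) (c : Int) (j : Nat) : List Int :=
  ((PySem.List.pyRange 0 (j : Int) 1).map (fun r => cellM g r c)).filter
    (fun x => decide (x ≠ 0))

theorem pyGetD_toNat {α : Type} (xs : List α) (i : Int) (d : α) (h : 0 ≤ i) :
    PySem.List.pyGetD xs i d = xs.getD i.toNat d := by
  rw [← Int.toNat_of_nonneg h, PySem.List.pyGetD_natCast, Int.toNat_natCast]

theorem cell_bridge (g : List (List Int)) (r c : Int) (hr : 0 ≤ r) (hc : 0 ≤ c) :
    PySem.List.pyGetD (PySem.List.pyGetD g r []) c 0 = cellM g r c := by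
  rw [pyGetD_toNat g r [] hr, pyGetD_toNat _ c 0 hc]; rfl

theorem put_bridge (g : List (List Int)) (r c v : Int) (hr : 0 ≤ r) (hc : 0 ≤ c) :
    PySem.List.pySetD g r (PySem.List.pySetD (PySem.List.pyGetD g r []) c v) = putM g r c v := by
  rw [pyGetD_toNat g r [] hr, PySem.List.pySetD_of_nonneg _ _ hc, PySem.List.pySetD_of_nonneg _ _ hr]
  rfl

theorem length_wrows (c : Int) (v : Int → Int) (g : List (List Int)) (R : List Int) :
    (wrows c v g R).length = g.length := by
  induction R generalizing g with
  | nil => rfl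
  | cons r R ih => simp [wrows, List.foldl_cons] at *; rw [ih]; simp [putM]

theorem wrows_congr (c : Int) (v v' : Int → Int) (g : List (List Int)) (R : List Int)
    (h : ∀ r ∈ R, v r = v' r) : wrows c v g R = wrows c v' g R := by
  induction R generalizing g with
  | nil => rfl
  | cons r R ih =>
      simp only [wrows, List.foldl_cons] at *
      rw [h r (by simp), ih _ (fun r hr => h r (by simp [hr]))]

theorem cellM_putM_ne (g : List (List Int)) (r r' c c' : Int) (v : Int)
    (h : r.toNat ≠ r'.toNat) : cellM (putM g r' c' v) r c = cellM g r c := by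
  simp [cellM, putM, List.getD, List.getElem?_set_ne (by omega : r'.toNat ≠ r.toNat)]

theorem wrows_getElem? (c : Int) (v : Int → Int) (g : List (List Int)) (R : List Int)
    (hR : ∀ r ∈ R, 0 ≤ r ∧ r.toNat < g.length) (hnd : R.Nodup) (i : Nat) :
    (wrows c v g R)[i]? =
      if (i : Int) ∈ R then (g[i]?).map (fun row => row.set c.toNat (v i)) else g[i]? := by
  induction R generalizing g with
  | nil => simp [wrows]
  | cons r R ih =>
      obtain ⟨hr0, hrlen⟩ := hR r (by simp)
      have hnd' : R.Nodup := hnd.of_cons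
      have hrR : r ∉ R := by simpa using (List.nodup_cons.mp hnd).1
      have hstep : wrows c v g (r :: R) = wrows c v (putM g r c (v r)) R := rfl
      rw [hstep, ih (putM g r c (v r))
        (fun x hx => ⟨(hR x (by simp [hx])).1, by
          simpa [putM] using (hR x (by simp [hx])).2⟩) hnd']
      by_cases hir : (i : Int) = r
      · have hi : i = r.toNat := by omega
        have hiR : (i : Int) ∉ R := by rw [hir]; exact hrR
        rw [if_neg hiR, if_pos (by simp [hir] : (i : Int) ∈ r :: R), hir]
        subst hi
        simp [putM, List.getD, hrlen]
      · have hi : i ≠ r.toNat := by omega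
        have hmem : ((i : Int) ∈ r :: R) ↔ ((i : Int) ∈ R) := by simp [hir]
        have hput : (putM g r c (v r))[i]? = g[i]? := by
          simp [putM, List.getElem?_set_ne (by omega : r.toNat ≠ i)]
        simp only [hmem, hput]

-- appendleft loop: prepending one 0 per element of l
theorem pad_foldl (l : List Int) (dq : List Int) :
    l.foldl (fun dq _ => (0 : Int) :: dq) dq = List.replicate l.length 0 ++ dq := by
  induction l generalizing dq with
  | nil => simp
  | cons x l ih =>
      simp only [List.foldl_cons, ih, List.length_cons]
      rw [List.replicate_succ' ]
      simp

-- A's collect loop is a filter of the column values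
theorem dq_foldl (g : List (List Int)) (c : Int) (m : Int) (hc : 0 ≤ c) (hm : 0 ≤ m) :
    (PySem.List.pyRange 0 m 1).foldl (fun dq r =>
      if PySem.List.pyGetD (PySem.List.pyGetD g r []) c 0 ≠ 0 then
        dq ++ [PySem.List.pyGetD (PySem.List.pyGetD g r []) c 0]
      else dq) [] = nzcol g c m.toNat := by
  have h1 : (PySem.List.pyRange 0 m 1).foldl (fun dq r =>
      if PySem.List.pyGetD (PySem.List.pyGetD g r []) c 0 ≠ 0 then
        dq ++ [PySem.List.pyGetD (PySem.List.pyGetD g r []) c 0]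
      else dq) [] = (PySem.List.pyRange 0 m 1).foldl (fun dq r =>
      if cellM g r c ≠ 0 then dq ++ [cellM g r c] else dq) [] := by
    apply PySem.List.foldl_congr_mem
    intro acc x hx
    have hx0 : 0 ≤ x := by
      have := (PySem.List.mem_pyRange_one.mp hx).1; omega
    rw [cell_bridge g x c hx0 hc]
  rw [h1]
  have h2 : (PySem.List.pyRange 0 m 1).foldl (fun dq r =>
      if cellM g r c ≠ 0 then dq ++ [cellM g r c] else dq) [] =
      ((PySem.List.pyRange 0 m 1).map (fun r => cellM g r c)).foldl (fun dq x =>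
      if x ≠ 0 then dq ++ [x] else dq) [] := by
    rw [List.foldl_map]
  rw [h2, PySem.List.foldl_append_ite_eq_filter]
  unfold nzcol
  rw [Int.toNat_of_nonneg hm]
  rfl

-- nzcol has at most m entries
theorem nzcol_length_le (g : List (List Int)) (c : Int) (j : Nat) :
    (nzcol g c j).length ≤ j := by
  unfold nzcol
  calc _ ≤ ((PySem.List.pyRange 0 (j : Int) 1).map (fun r => cellM g r c)).length :=
        List.length_filter_le _ _
    _ = j := by simp [PySem.List.length_pyRange_one]

theorem nzcol_succ (g : List (List Int)) (c : Int) (j : Nat) :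
    nzcol g c (j + 1) = nzcol g c j ++
      (if cellM g (j : Int) c ≠ 0 then [cellM g (j : Int) c] else []) := by
  unfold nzcol
  rw [show ((j + 1 : Nat) : Int) = (j : Int) + 1 by push_cast; ring,
    PySem.List.pyRange_one_succ_right (by positivity)]
  simp only [List.map_append, List.filter_append, List.map_cons, List.map_nil]
  congr 1
  by_cases h : cellM g (j : Int) c ≠ 0 <;> simp [h]

-- rows below j are untouched by a write at row w ≥ j
theorem nzcol_putM (g : List (List Int)) (c c' : Int) (j : Nat) (w : Int) (v : Int)
    (hw : (j : Int) ≤ w) : nzcol (putM g w c' v) c j = nzcol g c j := by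
  unfold nzcol
  congr 1
  apply List.map_congr_left
  intro r hr
  have hr2 := PySem.List.mem_pyRange_one.mp hr
  exact cellM_putM_ne _ _ _ _ _ _ (by omega)

-- ===== the phase-1 invariant: B's backward scan writes the reversed nonzeros at w, w-1, … =====
theorem phase1_eq (c : Int) (hc : 0 ≤ c) (j : Nat) :
    ∀ (g : List (List Int)) (w : Int), (j : Int) - 1 ≤ w →
    (PySem.List.pyRange ((j : Int) - 1) (-1) (-1)).foldl
      (fun (s : List (List Int) × Int) r =>
        if PySem.List.pyGetD (PySem.List.pyGetD s.1 r []) c 0 ≠ 0 then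
          (PySem.List.pySetD s.1 s.2
            (PySem.List.pySetD (PySem.List.pyGetD s.1 s.2 []) c
              (PySem.List.pyGetD (PySem.List.pyGetD s.1 r []) c 0)), s.2 - 1)
        else s) (g, w) =
    (wrows c (fun r => (nzcol g c j).getD (r - w + (nzcol g c j).length - 1).toNat 0) g
        (PySem.List.pyRange w (w - (nzcol g c j).length) (-1)),
      w - (nzcol g c j).length) := by
  induction j with
  | zero =>
      intro g w _
      rw [PySem.List.pyRange_neg_one_eq_nil (by norm_num)]
      have hnz : nzcol g c 0 = [] := by
        unfold nzcol; rw [PySem.List.pyRange_one_eq_nil (by norm_num)]; rfl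
      rw [hnz]
      have : w - (([] : List Int).length : Int) = w := by norm_num
      rw [this, PySem.List.pyRange_neg_one_eq_nil (le_refl w)]
      rfl
  | succ j ih =>
      intro g w hw
      have hjw : (j : Int) ≤ w := by push_cast at hw ⊢; omega
      rw [show ((j + 1 : Nat) : Int) - 1 = (j : Int) by push_cast; ring,
        PySem.List.pyRange_neg_one_cons (by omega : (-1 : Int) < (j : Int)),
        List.foldl_cons]
      have hcell := cell_bridge g (j : Int) c (by positivity) hc
      by_cases hnz : cellM g (j : Int) c ≠ 0
      · -- nonzero at row j: write it at w, recurse with w-1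
        have hw0 : (0 : Int) ≤ w := by omega
        rw [if_pos (by rw [hcell]; exact hnz)]
        simp only [hcell]
        rw [put_bridge g w c _ hw0 hc]
        set g1 := putM g w c (cellM g (j : Int) c) with hg1
        have hrec := ih g1 (w - 1) (by omega)
        rw [hrec, Prod.mk.injEq]
        -- nonzeros of rows < j are unchanged by the write at row w ≥ j
        have hnzg1 : nzcol g1 c j = nzcol g c j := nzcol_putM g c c j w _ hjw
        have htot : nzcol g c (j + 1) = nzcol g c j ++ [cellM g (j : Int) c] := by
          rw [nzcol_succ]; simp [hnz]
        set nz' := nzcol g c j with hnz'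
        set k' := nz'.length with hk'
        have hlen : (nzcol g c (j + 1)).length = k' + 1 := by rw [htot]; simp [hk']
        refine ⟨?_, ?_⟩
        · -- grids agree
          rw [hnzg1, htot]
          have hlen2 : ((nz' ++ [cellM g (j : Int) c]).length : Int) = (k' : Int) + 1 := by
            simp [hk']
          rw [hlen2]
          rw [PySem.List.pyRange_neg_one_cons
            (by omega : w - ((k' : Int) + 1) < w)]
          have hhead : wrows c
              (fun r => (nz' ++ [cellM g (j:Int) c]).getD (r - w + ((k':Int) + 1) - 1).toNat 0) g
              (w :: PySem.List.pyRange (w - 1) (w - ((k' : Int) + 1)) (-1)) =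
              wrows c
              (fun r => (nz' ++ [cellM g (j:Int) c]).getD (r - w + ((k':Int) + 1) - 1).toNat 0)
              (putM g w c ((nz' ++ [cellM g (j:Int) c]).getD ((w : Int) - w + ((k':Int) + 1) - 1).toNat 0))
              (PySem.List.pyRange (w - 1) (w - ((k' : Int) + 1)) (-1)) := rfl
          rw [hhead]
          have hv : (nz' ++ [cellM g (j:Int) c]).getD ((w : Int) - w + ((k':Int) + 1) - 1).toNat 0 =
              cellM g (j : Int) c := by
            have : ((w : Int) - w + ((k':Int) + 1) - 1).toNat = k' := by omega
            rw [this, hk', List.getD_append_right _ _ _ _ (le_refl _)]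
            simp
          rw [hv, ← hg1]
          have hrange : w - ((k' : Int) + 1) = w - 1 - (k' : Int) := by ring
          rw [hrange]
          apply wrows_congr
          intro r hr
          have hr2 := PySem.List.mem_pyRange_neg_one.mp hr
          have hidx : (r - w + ((k' : Int) + 1) - 1).toNat = (r - (w - 1) + (k' : Int) - 1).toNat := by
            omega
          rw [hidx]
          have hlt : (r - (w - 1) + (k' : Int) - 1).toNat < k' := by omega
          rw [List.getD_append _ _ _ _ (by omega)]
        · -- write pointers agree
          rw [hnzg1, htot]
          simp
          omega
      · -- zero at row j: state unchanged
        rw [if_neg (by rw [hcell]; exact hnz)]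
        have hrec := ih g w (by omega)
        rw [hrec]
        have htot : nzcol g c (j + 1) = nzcol g c j := by
          rw [nzcol_succ]; simp at hnz; simp [hnz]
        rw [htot]

-- B's zero-fill loop is a wrows with constant value 0
theorem phase2_eq (c : Int) (hc : 0 ≤ c) (g : List (List Int)) (w : Int) :
    (PySem.List.pyRange w (-1) (-1)).foldl (fun b r =>
      PySem.List.pySetD b r (PySem.List.pySetD (PySem.List.pyGetD b r []) c 0)) g =
    wrows c (fun _ => 0) g (PySem.List.pyRange w (-1) (-1)) := by
  apply PySem.List.foldl_congr_mem
  intro acc r hr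
  have hr2 := PySem.List.mem_pyRange_neg_one.mp hr
  rw [put_bridge acc r c 0 (by omega) hc]

-- A's write-back loop is a wrows reading the padded deque
theorem writeA_eq (c : Int) (hc : 0 ≤ c) (g : List (List Int)) (m : Int) (dq : List Int) :
    (PySem.List.pyRange 0 m 1).foldl (fun b r =>
      PySem.List.pySetD b r
        (PySem.List.pySetD (PySem.List.pyGetD b r []) c (PySem.List.pyGetD dq r 0))) g =
    wrows c (fun r => dq.getD r.toNat 0) g (PySem.List.pyRange 0 m 1) := by
  apply PySem.List.foldl_congr_mem
  intro acc r hr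
  have hr2 := PySem.List.mem_pyRange_one.mp hr
  rw [pyGetD_toNat dq r 0 (by omega), put_bridge acc r c _ (by omega) hc]

theorem nodup_pyRange_neg_one (a b : Int) : (PySem.List.pyRange a b (-1)).Nodup := by
  rw [PySem.List.pyRange_neg_one_eq_reverse, List.nodup_reverse]
  exact PySem.List.nodup_pyRange_one _ _

-- ===== the per-column equality =====

theorem foldl_id {α β : Type} (L : List α) (g : β) : L.foldl (fun b _ => b) g = g := by
  induction L generalizing g <;> simp [List.foldl]

-- splitting the single ascending write pass into B's two descending passes
theorem wrows_split (c : Int) (g : List (List Int)) (m : Int) (nz : List Int)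
    (hm : 0 < m) (hlen : m ≤ (g.length : Int)) (hk : (nz.length : Int) ≤ m) :
    wrows c (fun r => (List.replicate (m - (nz.length : Int)).toNat 0 ++ nz).getD r.toNat 0) g
      (PySem.List.pyRange 0 m 1) =
    wrows c (fun _ => 0)
      (wrows c (fun r => nz.getD (r - (m - 1) + (nz.length : Int) - 1).toNat 0) g
        (PySem.List.pyRange (m - 1) (m - 1 - (nz.length : Int)) (-1)))
      (PySem.List.pyRange (m - 1 - (nz.length : Int)) (-1) (-1)) := by
  have hk0 : (0 : Int) ≤ nz.length := by positivity
  apply List.ext_getElem?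
  intro i
  rw [wrows_getElem? c _ g (PySem.List.pyRange 0 m 1)
      (fun r hr => by
        have h := PySem.List.mem_pyRange_one.mp hr
        exact ⟨h.1, by omega⟩)
      (PySem.List.nodup_pyRange_one _ _) i]
  rw [wrows_getElem? c _ _ (PySem.List.pyRange (m - 1 - (nz.length : Int)) (-1) (-1))
      (fun r hr => by
        have h := PySem.List.mem_pyRange_neg_one.mp hr
        refine ⟨by omega, ?_⟩
        rw [length_wrows]
        omega)
      (nodup_pyRange_neg_one _ _) i]
  rw [wrows_getElem? c _ g (PySem.List.pyRange (m - 1) (m - 1 - (nz.length : Int)) (-1))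
      (fun r hr => by
        have h := PySem.List.mem_pyRange_neg_one.mp hr
        exact ⟨by omega, by omega⟩)
      (nodup_pyRange_neg_one _ _) i]
  simp only [PySem.List.mem_pyRange_one, PySem.List.mem_pyRange_neg_one]
  by_cases h1 : (i : Int) ≤ m - 1 - (nz.length : Int)
  · -- zero region: A writes a leading 0 of the padded deque, B's second pass writes 0
    rw [if_pos (⟨by omega, by omega⟩ : (0 : Int) ≤ (i : Int) ∧ (i : Int) < m),
      if_pos (⟨by omega, by omega⟩ : (-1 : Int) < (i : Int) ∧ (i : Int) ≤ m - 1 - (nz.length : Int)),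
      if_neg (by omega : ¬((m - 1 - (nz.length : Int) < (i : Int)) ∧ (i : Int) ≤ m - 1))]
    have hv : (List.replicate (m - (nz.length : Int)).toNat 0 ++ nz).getD ((i : Int)).toNat 0
        = (0 : Int) := by
      rw [Int.toNat_natCast,
        List.getD_append _ _ _ _ (by simp [List.length_replicate]; omega),
        List.getD_replicate _ (by omega)]
    rw [hv]
  · by_cases h2 : (i : Int) ≤ m - 1
    · -- nonzero region: A writes the tail of the padded deque, B's first pass wrote it
      rw [if_pos (⟨by omega, by omega⟩ : (0 : Int) ≤ (i : Int) ∧ (i : Int) < m),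
        if_neg (by omega : ¬((-1 : Int) < (i : Int) ∧ (i : Int) ≤ m - 1 - (nz.length : Int))),
        if_pos (⟨by omega, by omega⟩ : m - 1 - (nz.length : Int) < (i : Int) ∧ (i : Int) ≤ m - 1)]
      have hv : (List.replicate (m - (nz.length : Int)).toNat 0 ++ nz).getD ((i : Int)).toNat 0
          = nz.getD ((i : Int) - (m - 1) + (nz.length : Int) - 1).toNat 0 := by
        rw [Int.toNat_natCast,
          List.getD_append_right _ _ _ _ (by simp [List.length_replicate]; omega)]
        congr 1
        simp [List.length_replicate]
        omega
      rw [hv]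
    · -- untouched rows below the first m
      rw [if_neg (by omega : ¬((0 : Int) ≤ (i : Int) ∧ (i : Int) < m)),
        if_neg (by omega : ¬((-1 : Int) < (i : Int) ∧ (i : Int) ≤ m - 1 - (nz.length : Int))),
        if_neg (by omega : ¬(m - 1 - (nz.length : Int) < (i : Int) ∧ (i : Int) ≤ m - 1))]

-- phase1_eq specialised to an Int bound m and start w = m - 1
theorem phase1_eq' (c : Int) (hc : 0 ≤ c) (m : Int) (hm : 0 < m) (g : List (List Int)) :
    (PySem.List.pyRange (m - 1) (-1) (-1)).foldl
      (fun (s : List (List Int) × Int) r =>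
        if PySem.List.pyGetD (PySem.List.pyGetD s.1 r []) c 0 ≠ 0 then
          (PySem.List.pySetD s.1 s.2
            (PySem.List.pySetD (PySem.List.pyGetD s.1 s.2 []) c
              (PySem.List.pyGetD (PySem.List.pyGetD s.1 r []) c 0)), s.2 - 1)
        else s) (g, m - 1) =
    (wrows c (fun r => (nzcol g c m.toNat).getD
        (r - (m - 1) + (nzcol g c m.toNat).length - 1).toNat 0) g
        (PySem.List.pyRange (m - 1) (m - 1 - (nzcol g c m.toNat).length) (-1)),
      m - 1 - (nzcol g c m.toNat).length) := by
  have hmn : ((m.toNat : Nat) : Int) = m := Int.toNat_of_nonneg (le_of_lt hm)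
  have h := phase1_eq c hc m.toNat g (m - 1) (by omega)
  rw [hmn] at h
  rw [h]

-- A's whole per-column body as a single write pass over the padded deque
theorem colA_eq_wrows (m c : Int) (g : List (List Int)) (hc : 0 ≤ c) (hm : 0 ≤ m) :
    (let dq : List Int := (PySem.List.pyRange 0 m 1).foldl (fun dq r =>
      if PySem.List.pyGetD (PySem.List.pyGetD g r []) c 0 ≠ 0 then
        dq ++ [PySem.List.pyGetD (PySem.List.pyGetD g r []) c 0]
      else dq) []
    let dq := (PySem.List.pyRange 0 (m - (dq.length : Int)) 1).foldl
      (fun dq _ => (0 : Int) :: dq) dq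
    (PySem.List.pyRange 0 m 1).foldl (fun b r =>
      PySem.List.pySetD b r
        (PySem.List.pySetD (PySem.List.pyGetD b r []) c (PySem.List.pyGetD dq r 0))) g) =
    wrows c (fun r => (List.replicate (m - ((nzcol g c m.toNat).length : Int)).toNat 0 ++
        nzcol g c m.toNat).getD r.toNat 0) g (PySem.List.pyRange 0 m 1) := by
  simp only [dq_foldl g c m hc hm, pad_foldl, writeA_eq c hc g m]
  congr 1
  simp [PySem.List.length_pyRange_one]

theorem col_eq (m c : Int) (g : List (List Int)) (hc : 0 ≤ c) (hm : 0 < m)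
    (hlen : m ≤ (g.length : Int)) :
    (let dq : List Int := (PySem.List.pyRange 0 m 1).foldl (fun dq r =>
      if PySem.List.pyGetD (PySem.List.pyGetD g r []) c 0 ≠ 0 then
        dq ++ [PySem.List.pyGetD (PySem.List.pyGetD g r []) c 0]
      else dq) []
    let dq := (PySem.List.pyRange 0 (m - (dq.length : Int)) 1).foldl
      (fun dq _ => (0 : Int) :: dq) dq
    (PySem.List.pyRange 0 m 1).foldl (fun b r =>
      PySem.List.pySetD b r
        (PySem.List.pySetD (PySem.List.pyGetD b r []) c (PySem.List.pyGetD dq r 0))) g) =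
    (let s := (PySem.List.pyRange (m - 1) (-1) (-1)).foldl
      (fun (s : List (List Int) × Int) r =>
        if PySem.List.pyGetD (PySem.List.pyGetD s.1 r []) c 0 ≠ 0 then
          (PySem.List.pySetD s.1 s.2
            (PySem.List.pySetD (PySem.List.pyGetD s.1 s.2 []) c
              (PySem.List.pyGetD (PySem.List.pyGetD s.1 r []) c 0)), s.2 - 1)
        else s) (g, m - 1)
    (PySem.List.pyRange s.2 (-1) (-1)).foldl (fun b r =>
      PySem.List.pySetD b r (PySem.List.pySetD (PySem.List.pyGetD b r []) c 0)) s.1) := by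
  rw [colA_eq_wrows m c g hc (le_of_lt hm)]
  simp only [phase1_eq' c hc m hm g]
  rw [phase2_eq c hc]
  exact wrows_split c g m (nzcol g c m.toNat) hm hlen
    (by
      have := nzcol_length_le g c m.toNat
      omega)

-- B's per-column body preserves the grid length
theorem length_colB (m c : Int) (g : List (List Int)) (hc : 0 ≤ c) (hm : 0 < m) :
    (let s := (PySem.List.pyRange (m - 1) (-1) (-1)).foldl
      (fun (s : List (List Int) × Int) r =>
        if PySem.List.pyGetD (PySem.List.pyGetD s.1 r []) c 0 ≠ 0 then
          (PySem.List.pySetD s.1 s.2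
            (PySem.List.pySetD (PySem.List.pyGetD s.1 s.2 []) c
              (PySem.List.pyGetD (PySem.List.pyGetD s.1 r []) c 0)), s.2 - 1)
        else s) (g, m - 1)
    (PySem.List.pyRange s.2 (-1) (-1)).foldl (fun b r =>
      PySem.List.pySetD b r (PySem.List.pySetD (PySem.List.pyGetD b r []) c 0)) s.1).length
      = g.length := by
  simp only [phase1_eq' c hc m hm g]
  rw [phase2_eq c hc, length_wrows, length_wrows]

-- the column loop: fold B's body over any list of nonnegative columns
theorem cols_eq (m : Int) (hm : 0 < m) : ∀ (L : List Int) (g : List (List Int)),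
    (∀ c ∈ L, 0 ≤ c) → m ≤ (g.length : Int) →
    L.foldl (fun b c =>
      let dq : List Int := (PySem.List.pyRange 0 m 1).foldl (fun dq r =>
        if PySem.List.pyGetD (PySem.List.pyGetD b r []) c 0 ≠ 0 then
          dq ++ [PySem.List.pyGetD (PySem.List.pyGetD b r []) c 0]
        else dq) []
      let dq := (PySem.List.pyRange 0 (m - (dq.length : Int)) 1).foldl
        (fun dq _ => (0 : Int) :: dq) dq
      (PySem.List.pyRange 0 m 1).foldl (fun b r =>
        PySem.List.pySetD b r
          (PySem.List.pySetD (PySem.List.pyGetD b r []) c (PySem.List.pyGetD dq r 0))) b) g =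
    L.foldl (fun b c =>
      let s := (PySem.List.pyRange (m - 1) (-1) (-1)).foldl
        (fun (s : List (List Int) × Int) r =>
          if PySem.List.pyGetD (PySem.List.pyGetD s.1 r []) c 0 ≠ 0 then
            (PySem.List.pySetD s.1 s.2
              (PySem.List.pySetD (PySem.List.pyGetD s.1 s.2 []) c
                (PySem.List.pyGetD (PySem.List.pyGetD s.1 r []) c 0)), s.2 - 1)
          else s) (b, m - 1)
      (PySem.List.pyRange s.2 (-1) (-1)).foldl (fun b r =>
        PySem.List.pySetD b r (PySem.List.pySetD (PySem.List.pyGetD b r []) c 0)) s.1) g := by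
  intro L
  induction L with
  | nil => intro g _ _; rfl
  | cons c L ih =>
      intro g hL hlen
      rw [List.foldl_cons, List.foldl_cons, col_eq m c g (hL c (by simp)) hm hlen]
      exact ih _ (fun c' hc' => hL c' (by simp [hc']))
        (by rw [length_colB m c g (hL c (by simp)) hm]; exact hlen)

-- ===== VERDICT (by name: the statement is the Claim_ definition above) =====
theorem blank_fill_spec : Claim_equal_blank_fill := by
  intro m n b _ hpre
  unfold Spec_blank_fill blank_fill blank_fill_alt
  by_cases hn : 0 < n
  · by_cases hm : 0 < m
    · exact cols_eq m hm (PySem.List.pyRange 0 n 1) b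
        (fun c hc => (PySem.List.mem_pyRange_one.mp hc).1) (hpre hm hn).1
    · -- m ≤ 0: every per-column body is the identity on both sides
      have hA : ∀ (g : List (List Int)) (c : Int),
          (let dq : List Int := (PySem.List.pyRange 0 m 1).foldl (fun dq r =>
            if PySem.List.pyGetD (PySem.List.pyGetD g r []) c 0 ≠ 0 then
              dq ++ [PySem.List.pyGetD (PySem.List.pyGetD g r []) c 0]
            else dq) []
          let dq := (PySem.List.pyRange 0 (m - (dq.length : Int)) 1).foldl
            (fun dq _ => (0 : Int) :: dq) dq
          (PySem.List.pyRange 0 m 1).foldl (fun b r =>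
            PySem.List.pySetD b r
              (PySem.List.pySetD (PySem.List.pyGetD b r []) c (PySem.List.pyGetD dq r 0))) g) = g := by
        intro g c
        simp only [PySem.List.pyRange_one_eq_nil (by omega : m ≤ 0), List.foldl_nil]
      have hB : ∀ (g : List (List Int)) (c : Int),
          (let s := (PySem.List.pyRange (m - 1) (-1) (-1)).foldl
            (fun (s : List (List Int) × Int) r =>
              if PySem.List.pyGetD (PySem.List.pyGetD s.1 r []) c 0 ≠ 0 then
                (PySem.List.pySetD s.1 s.2
                  (PySem.List.pySetD (PySem.List.pyGetD s.1 s.2 []) c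
                    (PySem.List.pyGetD (PySem.List.pyGetD s.1 r []) c 0)), s.2 - 1)
              else s) (g, m - 1)
          (PySem.List.pyRange s.2 (-1) (-1)).foldl (fun b r =>
            PySem.List.pySetD b r (PySem.List.pySetD (PySem.List.pyGetD b r []) c 0)) s.1) = g := by
        intro g c
        simp only [PySem.List.pyRange_neg_one_eq_nil (by omega : m - 1 ≤ -1), List.foldl_nil]
      calc (PySem.List.pyRange 0 n 1).foldl _ b
          = (PySem.List.pyRange 0 n 1).foldl (fun b _ => b) b := by
            apply PySem.List.foldl_congr_mem
            intro acc c _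
            exact hA acc c
        _ = b := foldl_id _ b
        _ = (PySem.List.pyRange 0 n 1).foldl (fun b _ => b) b := (foldl_id _ b).symm
        _ = (PySem.List.pyRange 0 n 1).foldl _ b := by
            apply PySem.List.foldl_congr_mem
            intro acc c _
            exact (hB acc c).symm
  · rw [PySem.List.pyRange_one_eq_nil (by omega : n ≤ 0)]
    rfl
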